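-- pv_equiv track=rewrite | github.com/CLEVER1337/acmp_agent | solutions/419.py | reconstruct_with_deletion
-- ===== SOURCE A (Python) =====
-- def is_letter(c):
--     return 'a' <= c <= 'z' or 'A' <= c <= 'Z'
--
-- def reconstruct_with_deletion(s, pos):
--     letters = [c for c in s if is_letter(c)]
--     result = []
--     letter_count = 0
--
--     for c in s:
--         if is_letter(c):
--             if letter_count != pos:
--                 result.append(c)
--             letter_count += 1
--         else:
--             result.append(c)
--
--     return ''.join(result)
-- ===== SOURCE B (Python) =====
-- def is_letter(c):
--     return 'a' <= c <= 'z' or 'A' <= c <= 'Z'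
--
-- def reconstruct_with_deletion(s, pos):
--     count = 0
--     for i, c in enumerate(s):
--         if is_letter(c):
--             if count == pos:
--                 return s[:i] + s[i + 1:]
--             count += 1
--     return s
-- ===== Notes on version B (the rewrite author's own statement) =====
-- stated objective: simpler
-- what changed: Instead of rebuilding the string character by character while skipping the pos-th letter (and building an unused letters list), B locates the absolute index of the pos-th letter in one early-returning scan and splices the string once (s[:i] + s[i+1:]).
import Mathlib
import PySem

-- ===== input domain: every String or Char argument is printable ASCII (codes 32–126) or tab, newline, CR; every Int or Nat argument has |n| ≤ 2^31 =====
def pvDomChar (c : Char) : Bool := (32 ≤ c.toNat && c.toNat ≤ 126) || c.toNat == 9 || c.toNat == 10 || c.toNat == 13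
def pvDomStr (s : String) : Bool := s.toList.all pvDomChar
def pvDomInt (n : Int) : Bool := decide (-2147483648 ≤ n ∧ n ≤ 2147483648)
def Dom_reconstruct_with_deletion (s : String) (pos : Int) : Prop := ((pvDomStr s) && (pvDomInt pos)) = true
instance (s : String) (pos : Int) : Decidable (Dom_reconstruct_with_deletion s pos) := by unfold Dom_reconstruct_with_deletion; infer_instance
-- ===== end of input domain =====

-- B replaces A's rebuild-with-skip loop by find-the-index-of-the-pos-th-letter then one splice (simpler decomposition, same value).


-- ===== PORT A =====
def pvIsLetter (c : Char) : Bool := ('a' ≤ c && c ≤ 'z') || ('A' ≤ c && c ≤ 'Z')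

-- the for-loop of A: result accumulator, running letter_count k
def pvALoop (pos : Int) : List Char → Int → List Char
  | [], _ => []
  | c :: t, k =>
    if pvIsLetter c then
      (if k ≠ pos then [c] else []) ++ pvALoop pos t (k + 1)
    else
      c :: pvALoop pos t k

def reconstruct_with_deletion (s : String) (pos : Int) : String :=
  let _letters := s.toList.filter pvIsLetter   -- A builds this list and never uses it
  String.ofList (pvALoop pos s.toList 0)

-- ===== PORT B =====
-- B's early-returning enumerate loop: absolute index of the pos-th letter, if any
def pvFindIdx (pos : Int) : List Char → Int → Option Nat
  | [], _ => none
  | c :: t, k =>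
    if pvIsLetter c then
      if k = pos then some 0
      else (pvFindIdx pos t (k + 1)).map (· + 1)
    else (pvFindIdx pos t k).map (· + 1)

def reconstruct_with_deletion_alt (s : String) (pos : Int) : String :=
  match pvFindIdx pos s.toList 0 with
  | some i => String.ofList (s.toList.take i ++ s.toList.drop (i + 1))  -- s[:i] + s[i+1:], exact for 0 ≤ i ≤ len s
  | none => s

-- ===== PRECONDITION & SPEC =====
def Spec_reconstruct_with_deletion (s : String) (pos : Int) (out : String) : Prop := out = reconstruct_with_deletion_alt s pos
instance (s : String) (pos : Int) (out : String) : Decidable (Spec_reconstruct_with_deletion s pos out) := by unfold Spec_reconstruct_with_deletion; infer_instance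

-- ===== CLAIM (what is proved, stated in full; the proofs are below) =====
def Claim_equal_reconstruct_with_deletion : Prop := ∀ (s : String) (pos : Int), Dom_reconstruct_with_deletion s pos → Spec_reconstruct_with_deletion s pos (reconstruct_with_deletion s pos)

-- ===== LEMMAS AND PROOFS =====

-- once the letter count has passed pos, A's loop copies the rest unchanged
theorem pvALoop_past (pos : Int) (l : List Char) (k : Int) (h : pos < k) :
    pvALoop pos l k = l := by
  induction l generalizing k with
  | nil => rfl
  | cons c t ih =>
    simp only [pvALoop]
    by_cases hc : pvIsLetter c = true
    · have hk : k ≠ pos := by omega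
      simp [hc, hk, ih (k + 1) (by omega)]
    · simp [hc, ih k h]

-- A's loop from count k equals B's find-then-splice from count k
theorem pvALoop_eq_splice (pos : Int) (l : List Char) (k : Int) :
    pvALoop pos l k =
      match pvFindIdx pos l k with
      | some i => l.take i ++ l.drop (i + 1)
      | none => l := by
  induction l generalizing k with
  | nil => rfl
  | cons c t ih =>
    simp only [pvALoop, pvFindIdx]
    by_cases hc : pvIsLetter c = true
    · by_cases hk : k = pos
      · simp [hc, hk, pvALoop_past pos t (pos + 1) (by omega)]
      · simp only [hc, if_neg hk, ite_not, if_true]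
        rw [ih (k + 1)]
        cases pvFindIdx pos t (k + 1) with
        | none => simp [hk]
        | some i => simp [hk, List.take_succ_cons, List.drop_succ_cons]
    · simp only [hc, Bool.false_eq_true, if_false]
      rw [ih k]
      cases pvFindIdx pos t k with
      | none => rfl
      | some i => simp [List.take_succ_cons, List.drop_succ_cons]

-- ===== VERDICT (by name: the statement is the Claim_ definition above) =====
theorem reconstruct_with_deletion_spec : Claim_equal_reconstruct_with_deletion := by
  intro s pos _
  unfold Spec_reconstruct_with_deletion reconstruct_with_deletion reconstruct_with_deletion_alt
  rw [pvALoop_eq_splice]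
  cases h : pvFindIdx pos s.toList 0 with
  | none => simp [h, String.ofList_toList]
  | some i => simp
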